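-- pv_equiv track=rewrite | github.com/LeoDorea/Enron_Emails_Udacity | get_schemes_citation.py | get_schemes
-- ===== SOURCE A (Python) =====
-- def get_schemes(text, schemes_citation):
--     '''
--     Function to return the numbers of enron schemes citation on a text
--
--     :param text: list with the words on the text
--
--     :return schemes_citation: number of citation of enron schemes on the text
--     '''
--     california_schemes = ["fat boy", "inc-ing", "ricochet", "megawatt laundering", "black window", "big foot",
--                           "get shorty", "death star", "cong catcher", "perpetual loop", "red congo"]
--
--     for pos in range(len(text)):
--         # For one-word schemes just look on the list
--         if text[pos] in california_schemes:
--             schemes_citation += 1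
--
--         # For two-word schemes, it is necessary to check two words
--         elif ((text[pos - 1] == 'fat') and (text[pos] == 'boy')):
--             schemes_citation += 1
--         elif ((text[pos - 1] == 'megawatt') and (text[pos] == 'laundering')):
--             schemes_citation += 1
--         elif ((text[pos - 1] == 'black') and (text[pos] == 'window')):
--             schemes_citation += 1
--         elif ((text[pos - 1] == 'big') and (text[pos] == 'foot')):
--             schemes_citation += 1
--         elif ((text[pos - 1] == 'get') and (text[pos] == 'shorty')):
--             schemes_citation += 1
--         elif ((text[pos - 1] == 'death') and (text[pos] == 'star')):
--             schemes_citation += 1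
--         elif ((text[pos - 1] == 'cong') and (text[pos] == 'catcher')):
--             schemes_citation += 1
--         elif ((text[pos - 1] == 'perpetual') and (text[pos] == 'loop')):
--             schemes_citation += 1
--         elif ((text[pos - 1] == 'red') and (text[pos] == 'congo')):
--             schemes_citation += 1
--
--     return schemes_citation
-- ===== SOURCE B (Python) =====
-- def get_schemes(text, schemes_citation):
--     singles = {"fat boy", "inc-ing", "ricochet", "megawatt laundering", "black window",
--                "big foot", "get shorty", "death star", "cong catcher", "perpetual loop",
--                "red congo"}
--     pairs = {("fat", "boy"), ("megawatt", "laundering"), ("black", "window"),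
--              ("big", "foot"), ("get", "shorty"), ("death", "star"),
--              ("cong", "catcher"), ("perpetual", "loop"), ("red", "congo")}
--     single_hits = sum(1 for w in text if w in singles)
--     pair_hits = sum(1 for pos in range(len(text))
--                     if (text[pos - 1], text[pos]) in pairs)
--     return schemes_citation + single_hits + pair_hits
-- ===== Notes on version B (the rewrite author's own statement) =====
-- stated objective: faster
-- what changed: Replaces the 10-branch if/elif chain (with a linear membership scan of the scheme list at every position) by two set-membership counts: one pass over the words testing a precomputed singles set, and one pass testing (text[pos-1], text[pos]) against a set of the nine two-word schemes, keeping the pos-1 wraparound.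
import Mathlib
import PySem

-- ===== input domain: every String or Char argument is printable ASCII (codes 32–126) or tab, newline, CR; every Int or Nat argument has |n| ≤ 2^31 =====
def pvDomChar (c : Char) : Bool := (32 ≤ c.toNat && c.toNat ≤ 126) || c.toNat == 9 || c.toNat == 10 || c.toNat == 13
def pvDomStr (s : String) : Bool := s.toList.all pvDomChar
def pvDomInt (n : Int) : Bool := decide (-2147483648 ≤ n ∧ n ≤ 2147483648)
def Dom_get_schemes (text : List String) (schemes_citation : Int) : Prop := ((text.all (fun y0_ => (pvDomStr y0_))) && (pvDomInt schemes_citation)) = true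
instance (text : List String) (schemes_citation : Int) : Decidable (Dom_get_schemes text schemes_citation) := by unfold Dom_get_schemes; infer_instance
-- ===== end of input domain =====

-- B replaces A's 10-branch if/elif chain per index by two membership counts (singles over the
-- words, pairs over (text[pos-1], text[pos]) with the same pos-1 wraparound); return value only.

-- ===== PORT A =====
def californiaSchemes : List String :=
  ["fat boy", "inc-ing", "ricochet", "megawatt laundering", "black window", "big foot",
   "get shorty", "death star", "cong catcher", "perpetual loop", "red congo"]

def get_schemes (text : List String) (schemes_citation : Int) : Int :=
  (PySem.List.pyRange 0 (text.length : Int) 1).foldl (fun acc pos =>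
    let cur := PySem.List.pyGetD text pos ""
    let prev := PySem.List.pyGetD text (pos - 1) ""
    if cur ∈ californiaSchemes then acc + 1
    else if prev = "fat" ∧ cur = "boy" then acc + 1
    else if prev = "megawatt" ∧ cur = "laundering" then acc + 1
    else if prev = "black" ∧ cur = "window" then acc + 1
    else if prev = "big" ∧ cur = "foot" then acc + 1
    else if prev = "get" ∧ cur = "shorty" then acc + 1
    else if prev = "death" ∧ cur = "star" then acc + 1
    else if prev = "cong" ∧ cur = "catcher" then acc + 1
    else if prev = "perpetual" ∧ cur = "loop" then acc + 1
    else if prev = "red" ∧ cur = "congo" then acc + 1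
    else acc) schemes_citation

-- ===== PORT B =====
def pairSchemes : List (String × String) :=
  [("fat", "boy"), ("megawatt", "laundering"), ("black", "window"), ("big", "foot"),
   ("get", "shorty"), ("death", "star"), ("cong", "catcher"), ("perpetual", "loop"),
   ("red", "congo")]

def get_schemes_alt (text : List String) (schemes_citation : Int) : Int :=
  let singleHits : Int := ((text.filter (fun w => w ∈ californiaSchemes)).length : Int)
  let pairHits : Int := (((PySem.List.pyRange 0 (text.length : Int) 1).filter
      (fun pos => (PySem.List.pyGetD text (pos - 1) "", PySem.List.pyGetD text pos "") ∈ pairSchemes)).length : Int)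
  schemes_citation + singleHits + pairHits

-- ===== PRECONDITION & SPEC =====
def Spec_get_schemes (text : List String) (schemes_citation : Int) (out : Int) : Prop := out = get_schemes_alt text schemes_citation
instance (text : List String) (schemes_citation : Int) (out : Int) : Decidable (Spec_get_schemes text schemes_citation out) := by unfold Spec_get_schemes; infer_instance

-- ===== CLAIM (what is proved, stated in full; the proofs are below) =====
def Claim_equal_get_schemes : Prop := ∀ (text : List String) (schemes_citation : Int), Dom_get_schemes text schemes_citation → Spec_get_schemes text schemes_citation (get_schemes text schemes_citation)

-- ===== LEMMAS AND PROOFS =====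
lemma pv_step_eq (acc : Int) (p c : String) :
    (if c ∈ californiaSchemes then acc + 1
     else if p = "fat" ∧ c = "boy" then acc + 1
     else if p = "megawatt" ∧ c = "laundering" then acc + 1
     else if p = "black" ∧ c = "window" then acc + 1
     else if p = "big" ∧ c = "foot" then acc + 1
     else if p = "get" ∧ c = "shorty" then acc + 1
     else if p = "death" ∧ c = "star" then acc + 1
     else if p = "cong" ∧ c = "catcher" then acc + 1
     else if p = "perpetual" ∧ c = "loop" then acc + 1
     else if p = "red" ∧ c = "congo" then acc + 1
     else acc)
    = acc + ((if c ∈ californiaSchemes then 1 else 0)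
           + (if (p, c) ∈ pairSchemes then 1 else 0)) := by
  by_cases hc : c ∈ californiaSchemes
  · have hc' := hc
    simp only [californiaSchemes, List.mem_cons, List.not_mem_nil, or_false] at hc'
    simp only [if_pos hc]
    rcases hc' with rfl | rfl | rfl | rfl | rfl | rfl | rfl | rfl | rfl | rfl | rfl <;>
      simp [pairSchemes]
  · simp only [if_neg hc]
    simp only [pairSchemes, List.mem_cons, List.not_mem_nil, or_false, Prod.mk.injEq]
    by_cases hd : (p = "fat" ∧ c = "boy") ∨ (p = "megawatt" ∧ c = "laundering") ∨
        (p = "black" ∧ c = "window") ∨ (p = "big" ∧ c = "foot") ∨ (p = "get" ∧ c = "shorty") ∨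
        (p = "death" ∧ c = "star") ∨ (p = "cong" ∧ c = "catcher") ∨
        (p = "perpetual" ∧ c = "loop") ∨ (p = "red" ∧ c = "congo")
    · rw [if_pos hd]
      rcases hd with ⟨rfl, rfl⟩ | ⟨rfl, rfl⟩ | ⟨rfl, rfl⟩ | ⟨rfl, rfl⟩ | ⟨rfl, rfl⟩ |
        ⟨rfl, rfl⟩ | ⟨rfl, rfl⟩ | ⟨rfl, rfl⟩ | ⟨rfl, rfl⟩ <;> simp
    · rw [if_neg hd]
      split_ifs with k1 k2 k3 k4 k5 k6 k7 k8 k9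
      · exact absurd (Or.inl k1) hd
      · exact absurd (Or.inr (Or.inl k2)) hd
      · exact absurd (Or.inr (Or.inr (Or.inl k3))) hd
      · exact absurd (Or.inr (Or.inr (Or.inr (Or.inl k4)))) hd
      · exact absurd (Or.inr (Or.inr (Or.inr (Or.inr (Or.inl k5))))) hd
      · exact absurd (Or.inr (Or.inr (Or.inr (Or.inr (Or.inr (Or.inl k6)))))) hd
      · exact absurd (Or.inr (Or.inr (Or.inr (Or.inr (Or.inr (Or.inr (Or.inl k7))))))) hd
      · exact absurd (Or.inr (Or.inr (Or.inr (Or.inr (Or.inr (Or.inr (Or.inr (Or.inl k8)))))))) hd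
      · exact absurd (Or.inr (Or.inr (Or.inr (Or.inr (Or.inr (Or.inr (Or.inr (Or.inr k9)))))))) hd
      · omega

lemma pv_foldA (text : List String) (sc : Int) :
    get_schemes text sc
      = sc + (List.map (fun pos =>
            (if PySem.List.pyGetD text pos "" ∈ californiaSchemes then (1:Int) else 0)
          + (if (PySem.List.pyGetD text (pos - 1) "", PySem.List.pyGetD text pos "") ∈ pairSchemes then (1:Int) else 0))
          (PySem.List.pyRange 0 (text.length : Int) 1)).sum := by
  unfold get_schemes
  rw [show (fun (acc pos : Int) =>
      let cur := PySem.List.pyGetD text pos ""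
      let prev := PySem.List.pyGetD text (pos - 1) ""
      if cur ∈ californiaSchemes then acc + 1
      else if prev = "fat" ∧ cur = "boy" then acc + 1
      else if prev = "megawatt" ∧ cur = "laundering" then acc + 1
      else if prev = "black" ∧ cur = "window" then acc + 1
      else if prev = "big" ∧ cur = "foot" then acc + 1
      else if prev = "get" ∧ cur = "shorty" then acc + 1
      else if prev = "death" ∧ cur = "star" then acc + 1
      else if prev = "cong" ∧ cur = "catcher" then acc + 1
      else if prev = "perpetual" ∧ cur = "loop" then acc + 1
      else if prev = "red" ∧ cur = "congo" then acc + 1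
      else acc)
    = fun acc pos =>
        acc + ((if PySem.List.pyGetD text pos "" ∈ californiaSchemes then (1:Int) else 0)
             + (if (PySem.List.pyGetD text (pos - 1) "", PySem.List.pyGetD text pos "") ∈ pairSchemes then (1:Int) else 0))
    from funext fun acc => funext fun pos => pv_step_eq acc _ _]
  exact PySem.List.foldl_add _ _ _

lemma pv_singles (text : List String) :
    (List.map (fun pos => if PySem.List.pyGetD text pos "" ∈ californiaSchemes then (1:Int) else 0)
      (PySem.List.pyRange 0 (text.length : Int) 1)).sum
    = ((text.filter (fun w => w ∈ californiaSchemes)).length : Int) := by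
  have hm : List.map (fun pos => if PySem.List.pyGetD text pos "" ∈ californiaSchemes then (1:Int) else 0)
      (PySem.List.pyRange 0 (text.length : Int) 1)
      = List.map (fun w => if w ∈ californiaSchemes then (1:Int) else 0) text := by
    rw [show (fun pos => if PySem.List.pyGetD text pos "" ∈ californiaSchemes then (1:Int) else 0)
        = (fun w => if w ∈ californiaSchemes then (1:Int) else 0) ∘ (fun j => PySem.List.pyGetD text j "") from rfl,
      ← List.map_map, PySem.List.map_pyGetD_pyRange_zero']
  rw [hm]
  have h := PySem.List.sum_map_ite_one_zero (fun w => decide (w ∈ californiaSchemes)) text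
  simp only [decide_eq_true_eq] at h
  rw [h, List.countP_eq_length_filter]

lemma pv_pairs (text : List String) :
    (List.map (fun pos => if (PySem.List.pyGetD text (pos - 1) "", PySem.List.pyGetD text pos "") ∈ pairSchemes then (1:Int) else 0)
      (PySem.List.pyRange 0 (text.length : Int) 1)).sum
    = (((PySem.List.pyRange 0 (text.length : Int) 1).filter
        (fun pos => (PySem.List.pyGetD text (pos - 1) "", PySem.List.pyGetD text pos "") ∈ pairSchemes)).length : Int) := by
  have h := PySem.List.sum_map_ite_one_zero
    (fun pos : Int => decide ((PySem.List.pyGetD text (pos - 1) "", PySem.List.pyGetD text pos "") ∈ pairSchemes))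
    (PySem.List.pyRange 0 (text.length : Int) 1)
  simp only [decide_eq_true_eq] at h
  rw [h, List.countP_eq_length_filter]

-- ===== VERDICT (by name: the statement is the Claim_ definition above) =====
theorem get_schemes_spec : Claim_equal_get_schemes := by
  intro text sc _
  unfold Spec_get_schemes get_schemes_alt
  rw [pv_foldA, PySem.List.sum_map_add_int, pv_singles, pv_pairs]
  ring
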